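-- pv_equiv track=rewrite | github.com/jaychsu/algorithm | other/unique_paths_with_followups.py | unique_paths_from_three_dir2
-- ===== SOURCE A (Python) =====
-- def unique_paths_from_three_dir2(m, n):
--     """
--     :type m: int
--     :type n: int
--     :rtype: int
--
--     >>> unique_paths_from_three_dir2(2, 2)
--     1
--     >>> unique_paths_from_three_dir2(2, 3)
--     2
--     >>> unique_paths_from_three_dir2(3, 3)
--     2
--     >>> unique_paths_from_three_dir2(4, 4)
--     4
--     """
--     if not m or not n:
--         return 0
--
--     dp = [[0] * n for _ in range(m)]
--     dp[0][0] = 1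
--
--     for y in range(1, n):
--         for x in range(m):
--             dp[x][y] = dp[x][y - 1]
--
--             if x > 0:
--                 dp[x][y] += dp[x - 1][y - 1]
--
--             if x + 1 < m:
--                 dp[x][y] += dp[x + 1][y - 1]
--
--     return dp[0][n - 1]
-- ===== SOURCE B (Python) =====
-- def unique_paths_from_three_dir2(m, n):
--     if not m or not n:
--         return 0
--     cache = {}
--     stack = [(0, n - 1)]
--     while stack:
--         x, y = stack[-1]
--         if y == 0:
--             cache[x, 0] = 1 if x == 0 else 0
--             stack.pop()
--             continue
--         t = cache.get((x, y - 1))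
--         if t is None:
--             stack.append((x, y - 1))
--             continue
--         if x > 0:
--             u = cache.get((x - 1, y - 1))
--             if u is None:
--                 stack.append((x - 1, y - 1))
--                 continue
--             t += u
--         if x + 1 < m:
--             v = cache.get((x + 1, y - 1))
--             if v is None:
--                 stack.append((x + 1, y - 1))
--                 continue
--             t += v
--         cache[x, y] = t
--         stack.pop()
--     return cache[0, n - 1]
-- ===== Notes on version B (the rewrite author's own statement) =====
-- stated objective: alternative
-- what changed: Replaces A's bottom-up filled m-by-n table with demand-driven top-down memoization: an explicit work stack resolves cell (0, n-1) by pushing exactly the still-uncached dependency cells, caching each cell's value in a dict keyed by (x, y), so only cells the answer actually depends on are ever computed.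
import Mathlib
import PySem

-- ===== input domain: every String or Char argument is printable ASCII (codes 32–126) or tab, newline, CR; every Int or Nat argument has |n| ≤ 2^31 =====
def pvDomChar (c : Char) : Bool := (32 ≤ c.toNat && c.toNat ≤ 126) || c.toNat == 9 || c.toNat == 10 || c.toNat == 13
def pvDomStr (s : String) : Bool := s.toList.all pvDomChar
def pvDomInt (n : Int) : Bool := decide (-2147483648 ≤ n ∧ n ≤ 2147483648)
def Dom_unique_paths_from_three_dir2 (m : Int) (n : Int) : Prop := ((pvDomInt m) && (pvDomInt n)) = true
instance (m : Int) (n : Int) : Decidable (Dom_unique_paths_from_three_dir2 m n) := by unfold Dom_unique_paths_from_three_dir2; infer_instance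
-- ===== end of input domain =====

-- B replaces A's bottom-up filled m×n table by demand-driven top-down memoization: an explicit
-- work stack resolves cell (0, n-1), pushing only still-uncached dependency cells and caching each
-- value in a dict keyed by (x, y) — objective: alternative (only demanded cells are computed).

-- ===== PORT A =====
-- dp[x][y] access/update on the 2D table (rows are the x index, as in A's list-of-lists)
def pvGet2 (dp : Array (Array Int)) (x y : Nat) : Int := (dp.getD x #[]).getD y 0
def pvSet2 (dp : Array (Array Int)) (x y : Nat) (v : Int) : Array (Array Int) :=
  let row := dp.getD x #[]
  let dp := dp.setIfInBounds x #[]   -- release the row so the update below is in place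
  dp.setIfInBounds x (row.setIfInBounds y v)

-- body of A's inner loop: dp[x][y] = dp[x][y-1]; += dp[x-1][y-1] if x>0; += dp[x+1][y-1] if x+1<m
def innerBodyA (M y : Nat) (dp : Array (Array Int)) (x : Nat) : Array (Array Int) :=
  let v := pvGet2 dp x (y - 1)
  let v := if 0 < x then v + pvGet2 dp (x - 1) (y - 1) else v
  let v := if x + 1 < M then v + pvGet2 dp (x + 1) (y - 1) else v
  pvSet2 dp x y v

def unique_paths_from_three_dir2 (m : Int) (n : Int) : Int :=
  if m = 0 ∨ n = 0 then 0
  else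
    -- under Pre_ both m and n are positive here, so toNat is exact
    let M := m.toNat
    let N := n.toNat
    let dp : Array (Array Int) := Array.replicate M (Array.replicate N 0)
    let dp := pvSet2 dp 0 0 1
    let dp := (List.range' 1 (N - 1)).foldl
      (fun dp y => (List.range M).foldl (innerBodyA M y) dp) dp
    pvGet2 dp 0 (N - 1)

-- ===== PORT B =====
-- B's while loop over the explicit work stack (top = head), with the cache dict threaded through;
-- fuel only makes the same loop total (it is proved sufficient below), each iteration is Source B's body
def loopB (m : Int) : Nat → List (Nat × Nat) → PySem.Dict (Nat × Nat) Int → PySem.Dict (Nat × Nat) Int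
  | 0, _, cache => cache
  | _ + 1, [], cache => cache
  | fuel + 1, (x, y) :: rest, cache =>
    match y with
    | 0 => loopB m fuel rest (cache.insert (x, 0) (if x = 0 then 1 else 0))
    | y' + 1 =>
      match cache.get? (x, y') with
      | none => loopB m fuel ((x, y') :: (x, y' + 1) :: rest) cache
      | some t =>
        if 0 < x then
          match cache.get? (x - 1, y') with
          | none => loopB m fuel ((x - 1, y') :: (x, y' + 1) :: rest) cache
          | some u =>
            if (x : Int) + 1 < m then
              match cache.get? (x + 1, y') with
              | none => loopB m fuel ((x + 1, y') :: (x, y' + 1) :: rest) cache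
              | some v => loopB m fuel rest (cache.insert (x, y' + 1) (t + u + v))
            else loopB m fuel rest (cache.insert (x, y' + 1) (t + u))
        else
          if (x : Int) + 1 < m then
            match cache.get? (x + 1, y') with
            | none => loopB m fuel ((x + 1, y') :: (x, y' + 1) :: rest) cache
            | some v => loopB m fuel rest (cache.insert (x, y' + 1) (t + v))
          else loopB m fuel rest (cache.insert (x, y' + 1) t)

def unique_paths_from_three_dir2_alt (m : Int) (n : Int) : Int :=
  if m = 0 ∨ n = 0 then 0
  else
    let N := n.toNat
    -- Python's cache[0, n - 1]: proved present under Pre_, so getD reads exactly that entry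
    (loopB m (3 * N * N + 2) [(0, N - 1)] PySem.Dict.empty).getD (0, N - 1) 0

-- ===== PRECONDITION & SPEC =====
-- Pre_ is exactly the set of inputs on which Python A returns: for negative m with n ≠ 0
-- (or positive m with negative n) A's empty/negative-size table raises IndexError.
def Pre_unique_paths_from_three_dir2 (m : Int) (n : Int) : Prop :=
  m = 0 ∨ n = 0 ∨ (0 < m ∧ 0 < n)
instance (m : Int) (n : Int) : Decidable (Pre_unique_paths_from_three_dir2 m n) := by
  unfold Pre_unique_paths_from_three_dir2; infer_instance

def pvWitness_unique_paths_from_three_dir2 : Int × Int := (4, 4)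

def Spec_unique_paths_from_three_dir2 (m : Int) (n : Int) (out : Int) : Prop := out = unique_paths_from_three_dir2_alt m n
instance (m : Int) (n : Int) (out : Int) : Decidable (Spec_unique_paths_from_three_dir2 m n out) := by unfold Spec_unique_paths_from_three_dir2; infer_instance

-- ===== CLAIM (what is proved, stated in full; the proofs are below) =====
def Claim_equal_unique_paths_from_three_dir2 : Prop := ∀ (m : Int) (n : Int), Dom_unique_paths_from_three_dir2 m n → Pre_unique_paths_from_three_dir2 m n → Spec_unique_paths_from_three_dir2 m n (unique_paths_from_three_dir2 m n)

-- ===== LEMMAS AND PROOFS =====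

-- the pure value B caches at (x, y): number of three-direction paths reaching (x, y)
def F (m : Int) : Nat → Nat → Int
  | x, 0 => if x = 0 then 1 else 0
  | x, y + 1 =>
      (F m x y + (if 0 < x then F m (x - 1) y else 0)) +
        (if (x : Int) + 1 < m then F m (x + 1) y else 0)

-- the demanded region: cells reachable going down-left from (0, N-1)
def Tset (N : Nat) : Finset (Nat × Nat) :=
  (Finset.range N ×ˢ Finset.range N).filter (fun p => p.1 + p.2 ≤ N - 1)

-- number of still-uncached demanded cells (the loop's potential)
def Ucount (N : Nat) (c : PySem.Dict (Nat × Nat) Int) : Nat :=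
  ((Tset N).filter (fun p => c.get? p = none)).card

lemma mem_Tset {N : Nat} (hN : 1 ≤ N) {p : Nat × Nat} (h : p.1 + p.2 ≤ N - 1) :
    p ∈ Tset N := by
  simp only [Tset, Finset.mem_filter, Finset.mem_product, Finset.mem_range]
  omega

lemma stack_le_U {N : Nat} (hN : 1 ≤ N) (stack : List (Nat × Nat))
    (c : PySem.Dict (Nat × Nat) Int)
    (h2 : stack.Pairwise (fun a b => a.2 < b.2))
    (h3 : ∀ e ∈ stack, c.get? e = none ∧ e.1 + e.2 ≤ N - 1) :
    stack.length ≤ Ucount N c := by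
  have hnd : stack.Nodup := (h2.imp (fun {a b} h => by
    intro he; rw [he] at h; exact lt_irrefl _ h))
  rw [← List.toFinset_card_of_nodup hnd]
  apply Finset.card_le_card
  intro e he
  rw [List.mem_toFinset] at he
  obtain ⟨hc, ht⟩ := h3 e he
  simp only [Finset.mem_filter]
  exact ⟨mem_Tset hN ht, hc⟩

lemma Ucount_insert {N : Nat} (hN : 1 ≤ N) (c : PySem.Dict (Nat × Nat) Int)
    (e : Nat × Nat) (v : Int) (he : e.1 + e.2 ≤ N - 1) (hc : c.get? e = none) :
    Ucount N (c.insert e v) + 1 = Ucount N c := by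
  have hmem : e ∈ (Tset N).filter (fun p => c.get? p = none) := by
    simp only [Finset.mem_filter]; exact ⟨mem_Tset hN he, hc⟩
  have hset : (Tset N).filter (fun p => (c.insert e v).get? p = none) =
      ((Tset N).filter (fun p => c.get? p = none)).erase e := by
    ext p
    simp only [Finset.mem_filter, Finset.mem_erase, PySem.Dict.get?_insert]
    constructor
    · rintro ⟨hp, hg⟩
      by_cases hpe : p = e
      · rw [if_pos hpe] at hg; cases hg
      · rw [if_neg hpe] at hg; exact ⟨hpe, hp, hg⟩
    · rintro ⟨hpe, hp, hg⟩
      exact ⟨hp, by rw [if_neg hpe]; exact hg⟩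
  have hpos : 0 < ((Tset N).filter (fun p => c.get? p = none)).card :=
    Finset.card_pos.mpr ⟨e, hmem⟩
  simp only [Ucount]
  rw [hset, Finset.card_erase_of_mem hmem]
  omega

-- the loop invariant carried through loopB: cached entries are F-values, the stack is a chain of
-- distinct uncached demanded cells; conclusion: the final cache is still F-correct, contains every
-- stack cell, and keeps every existing entry
lemma loopB_spec (m : Int) (N : Nat) (hN : 1 ≤ N) :
    ∀ (fuel : Nat) (stack : List (Nat × Nat)) (c : PySem.Dict (Nat × Nat) Int),
      (∀ x y v, c.get? (x, y) = some v → v = F m x y) →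
      stack.Pairwise (fun a b => a.2 < b.2) →
      (∀ e ∈ stack, c.get? e = none ∧ e.1 + e.2 ≤ N - 1) →
      3 * Ucount N c + 2 - stack.length ≤ fuel →
      (∀ x y v, (loopB m fuel stack c).get? (x, y) = some v → v = F m x y) ∧
      (∀ e ∈ stack, (loopB m fuel stack c).get? e = some (F m e.1 e.2)) ∧
      (∀ e v, c.get? e = some v → (loopB m fuel stack c).get? e = some v) := by
  intro fuel
  induction fuel with
  | zero =>
      intro stack c h1 h2 h3 hfuel
      exfalso
      have := stack_le_U hN stack c h2 h3
      omega
  | succ fuel ih =>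
      intro stack c h1 h2 h3 hfuel
      match stack with
      | [] =>
          refine ⟨h1, by simp, fun e v hv => hv⟩
      | (x, y) :: rest =>
          have htop := h3 (x, y) (List.mem_cons_self ..)
          have hlenU := stack_le_U hN _ c h2 h3
          have hUpos : 1 ≤ Ucount N c := by
            simp only [List.length_cons] at hlenU; omega
          -- shared facts for the three "pop and insert" exits
          have hrest_lt : ∀ b ∈ rest, y < b.2 := fun b hb => (List.pairwise_cons.mp h2).1 b hb
          have hinsert_exit : ∀ (w : Int), w = F m x y →
              (∀ x' y' v, ((c.insert (x, y) w).get? (x', y') = some v → v = F m x' y')) ∧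
              (∀ e ∈ rest, (c.insert (x, y) w).get? e = none ∧ e.1 + e.2 ≤ N - 1) := by
            intro w hw
            constructor
            · intro x' y' v hv
              rw [PySem.Dict.get?_insert] at hv
              by_cases hk : ((x' : Nat), (y' : Nat)) = (x, y)
              · rw [if_pos hk, Option.some_inj] at hv
                obtain ⟨hx', hy'⟩ := Prod.mk.injEq .. ▸ hk
                rw [← hv, hw, hx', hy']
              · rw [if_neg hk] at hv; exact h1 x' y' v hv
            · intro e he
              obtain ⟨hce, hte⟩ := h3 e (List.mem_cons_of_mem _ he)
              refine ⟨?_, hte⟩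
              rw [PySem.Dict.get?_insert,
                if_neg (fun hk => by
                  have := hrest_lt e he
                  rw [hk] at this; exact lt_irrefl _ this), hce]
          have hUdec : Ucount N (c.insert (x, y) (0 : Int)) + 1 = Ucount N c :=
            Ucount_insert hN c (x, y) 0 htop.2 htop.1
          -- the U-decrement is value-independent (the filter tests only key membership)
          have hUdec' : ∀ w : Int, Ucount N (c.insert (x, y) w) + 1 = Ucount N c :=
            fun w => Ucount_insert hN c (x, y) w htop.2 htop.1
          -- "pop and insert w" exit, packaged
          have exit : ∀ (w : Int), w = F m x y →
              (∀ x' y' v, (loopB m fuel rest (c.insert (x, y) w)).get? (x', y') = some v →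
                  v = F m x' y') ∧
              (∀ e ∈ (x, y) :: rest,
                  (loopB m fuel rest (c.insert (x, y) w)).get? e = some (F m e.1 e.2)) ∧
              (∀ e v, c.get? e = some v →
                  (loopB m fuel rest (c.insert (x, y) w)).get? e = some v) := by
            intro w hw
            obtain ⟨hi1, hi3⟩ := hinsert_exit w hw
            have hfuel' : 3 * Ucount N (c.insert (x, y) w) + 2 - rest.length ≤ fuel := by
              have := hUdec' w
              simp only [List.length_cons] at hfuel
              omega
            obtain ⟨g1, g2, g3⟩ := ih rest _ hi1 (List.Pairwise.of_cons h2) hi3 hfuel'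
            refine ⟨g1, ?_, ?_⟩
            · intro e he
              rcases List.mem_cons.mp he with he | he
              · subst he
                exact hw ▸ g3 (x, y) w (by rw [PySem.Dict.get?_insert_self])
              · exact g2 e he
            · intro e v hv
              apply g3
              rw [PySem.Dict.get?_insert]
              rw [if_neg (fun hk => by rw [hk, htop.1] at hv; cases hv)]
              exact hv
          -- "push a missing dependency d" step, packaged
          have push : ∀ (d : Nat × Nat), d.2 + 1 = y → c.get? d = none →
              d.1 + d.2 ≤ N - 1 →
              (∀ x' y' v, (loopB m fuel (d :: (x, y) :: rest) c).get? (x', y') = some v →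
                  v = F m x' y') ∧
              (∀ e ∈ (x, y) :: rest,
                  (loopB m fuel (d :: (x, y) :: rest) c).get? e = some (F m e.1 e.2)) ∧
              (∀ e v, c.get? e = some v →
                  (loopB m fuel (d :: (x, y) :: rest) c).get? e = some v) := by
            intro d hdy hdc hdt
            have h2' : (d :: (x, y) :: rest).Pairwise (fun a b => a.2 < b.2) := by
              rw [List.pairwise_cons]
              refine ⟨?_, h2⟩
              intro b hb
              rcases List.mem_cons.mp hb with hb | hb
              · rw [hb]; omega
              · have := hrest_lt b hb; omega
            have h3' : ∀ e ∈ d :: (x, y) :: rest, c.get? e = none ∧ e.1 + e.2 ≤ N - 1 := by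
              intro e he
              rcases List.mem_cons.mp he with he | he
              · subst he; exact ⟨hdc, hdt⟩
              · exact h3 e he
            have hfuel' : 3 * Ucount N c + 2 - (d :: (x, y) :: rest).length ≤ fuel := by
              have := stack_le_U hN _ c h2' h3'
              simp only [List.length_cons] at hfuel ⊢
              omega
            obtain ⟨g1, g2, g3⟩ := ih _ c h1 h2' h3' hfuel'
            exact ⟨g1, fun e he => g2 e (List.mem_cons_of_mem _ he), g3⟩
          match y, htop, hrest_lt, hinsert_exit, hUdec', exit with
          | 0, htop, hrest_lt, hinsert_exit, hUdec', exit =>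
              rw [loopB]
              exact exit (if x = 0 then 1 else 0) (by rw [F])
          | y' + 1, htop, hrest_lt, hinsert_exit, hUdec', exit =>
              rw [loopB]
              cases hg1 : c.get? (x, y') with
              | none => exact push (x, y') rfl hg1 (by have := htop.2; omega)
              | some t =>
                  dsimp only
                  have ht : t = F m x y' := h1 x y' t hg1
                  by_cases hx : 0 < x
                  · rw [if_pos hx]
                    cases hg2 : c.get? (x - 1, y') with
                    | none => exact push (x - 1, y') rfl hg2 (by have := htop.2; omega)
                    | some u =>
                        dsimp only
                        have hu : u = F m (x - 1) y' := h1 (x - 1) y' u hg2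
                        by_cases hx1 : (x : Int) + 1 < m
                        · rw [if_pos hx1]
                          cases hg3 : c.get? (x + 1, y') with
                          | none => exact push (x + 1, y') rfl hg3 (by have := htop.2; omega)
                          | some v =>
                              dsimp only
                              have hv : v = F m (x + 1) y' := h1 (x + 1) y' v hg3
                              exact exit (t + u + v)
                                (by rw [F, if_pos hx, if_pos hx1, ht, hu, hv])
                        · rw [if_neg hx1]
                          exact exit (t + u)
                            (by rw [F, if_pos hx, if_neg hx1, ht, hu]; ring)
                  · rw [if_neg hx]
                    by_cases hx1 : (x : Int) + 1 < m
                    · rw [if_pos hx1]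
                      cases hg3 : c.get? (x + 1, y') with
                      | none => exact push (x + 1, y') rfl hg3 (by have := htop.2; omega)
                      | some v =>
                          dsimp only
                          have hv : v = F m (x + 1) y' := h1 (x + 1) y' v hg3
                          exact exit (t + v)
                            (by rw [F, if_neg hx, if_pos hx1, ht, hv]; ring)
                    · rw [if_neg hx1]
                      exact exit t (by rw [F, if_neg hx, if_neg hx1, ht]; ring)

lemma Ucount_le (N : Nat) (c : PySem.Dict (Nat × Nat) Int) : Ucount N c ≤ N * N := by
  calc Ucount N c ≤ (Tset N).card := Finset.card_filter_le _ _
    _ ≤ (Finset.range N ×ˢ Finset.range N).card := Finset.card_filter_le _ _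
    _ = N * N := by rw [Finset.card_product, Finset.card_range]

-- B's loop from the initial state computes F at the goal cell
lemma loopB_goal (m : Int) (N : Nat) (hN : 1 ≤ N) :
    (loopB m (3 * N * N + 2) [(0, N - 1)] PySem.Dict.empty).get? (0, N - 1) =
      some (F m 0 (N - 1)) := by
  have h := loopB_spec m N hN (3 * N * N + 2) [(0, N - 1)] PySem.Dict.empty
    (fun x y v hv => by rw [PySem.Dict.get?_empty] at hv; cases hv)
    (List.pairwise_singleton _ _)
    (fun e he => by
      rw [List.mem_singleton] at he
      subst he
      exact ⟨PySem.Dict.get?_empty _, by omega⟩)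
    (by
      have hU := Ucount_le N PySem.Dict.empty
      have h3 : 3 * Ucount N PySem.Dict.empty ≤ 3 * (N * N) :=
        Nat.mul_le_mul_left 3 hU
      have hNN : 3 * N * N = 3 * (N * N) := Nat.mul_assoc 3 N N
      simp only [List.length_cons, List.length_nil]
      omega)
  exact h.2.1 (0, N - 1) (List.mem_singleton_self _)

-- the column vector A's table holds (0 outside the m rows)
def Gcol (M k x : Nat) : Int := if x < M then F (M : Int) x k else 0

-- the cell value A writes at (x, y) when column y-1 reads as prev
def fcell (M : Nat) (prev : Nat → Int) (x : Nat) : Int :=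
  prev x + ((if 0 < x then prev (x - 1) else 0) + (if x + 1 < M then prev (x + 1) else 0))

-- the table shape A's code maintains: M rows of length N
def Shape (dp : Array (Array Int)) (M N : Nat) : Prop :=
  dp.size = M ∧ ∀ x, x < M → (dp.getD x #[]).size = N

lemma agetD_set {α : Type} (d : α) (a : Array α) (i j : Nat) (v : α) :
    (a.setIfInBounds i v).getD j d = if i = j ∧ j < a.size then v else a.getD j d := by
  simp only [Array.getD, Array.size_setIfInBounds]
  split_ifs with h1 h2 h2 <;> try rfl
  · show (a.setIfInBounds i v)[j]'(by simp; exact h1) = v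
    rw [Array.getElem_setIfInBounds, if_pos h2.1]
    exact h1
  · show (a.setIfInBounds i v)[j]'(by simp; exact h1) = a[j]'h1
    rw [Array.getElem_setIfInBounds, if_neg (fun he => h2 ⟨he, h1⟩)]
  · exact absurd h2.2 h1

lemma agetD_rep {α : Type} (d : α) (n i : Nat) (v : α) :
    (Array.replicate n v).getD i d = if i < n then v else d := by
  simp only [Array.getD, Array.size_replicate]
  split_ifs <;> first | rfl | simp

lemma range'_concat1 (s n : Nat) : List.range' s (n+1) = List.range' s n ++ [s+n] := by
  rw [List.range'_concat]; norm_num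

lemma shape_pvSet2 {dp : Array (Array Int)} {M N : Nat} (h : Shape dp M N)
    (x y : Nat) (v : Int) : Shape (pvSet2 dp x y v) M N := by
  obtain ⟨hl, hr⟩ := h
  refine ⟨by simp [pvSet2, hl], fun x' hx' => ?_⟩
  simp only [pvSet2]
  rw [agetD_set]
  simp only [Array.size_setIfInBounds]
  by_cases hc : x = x' ∧ x' < dp.size
  · rw [if_pos hc]; rcases hc with ⟨rfl, _⟩
    rw [Array.size_setIfInBounds]; exact hr x hx'
  · rw [if_neg hc, agetD_set, if_neg (fun h' => hc ⟨h'.1, h'.2⟩)]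
    exact hr x' hx'

lemma pvGet2_pvSet2 (dp : Array (Array Int)) (x y : Nat) (v : Int) (x' y' : Nat) :
    pvGet2 (pvSet2 dp x y v) x' y' =
      if x = x' ∧ x' < dp.size ∧ y = y' ∧ y' < (dp.getD x #[]).size then v
      else pvGet2 dp x' y' := by
  simp only [pvGet2, pvSet2]
  rw [agetD_set]
  simp only [Array.size_setIfInBounds]
  by_cases h1 : x = x' ∧ x' < dp.size
  · rw [if_pos h1]
    rcases h1 with ⟨rfl, hlt⟩
    rw [agetD_set]
    by_cases h2 : y = y' ∧ y' < (dp.getD x #[]).size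
    · rw [if_pos h2, if_pos ⟨rfl, hlt, h2.1, h2.2⟩]
    · rw [if_neg h2, if_neg (fun hc => h2 ⟨hc.2.2.1, hc.2.2.2⟩)]
  · rw [if_neg h1, agetD_set, if_neg (fun h' => h1 ⟨h'.1, h'.2⟩),
      if_neg (fun hc => h1 ⟨hc.1, hc.2.1⟩)]

lemma pvGet2_ge {dp : Array (Array Int)} {M N : Nat} (h : Shape dp M N)
    {x : Nat} (hx : M ≤ x) (y : Nat) : pvGet2 dp x y = 0 := by
  have h1 := h.1
  have hnil : dp.getD x #[] = #[] := by
    simp [Array.getD]; omega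
  rw [pvGet2, hnil]
  simp [Array.getD]

-- A's per-cell value on column k+1 is exactly B's pure recursion
lemma fcell_F (M k x : Nat) (hx : x < M) :
    fcell M (Gcol M k) x = F (M : Int) x (k + 1) := by
  rw [F]
  simp only [fcell, Gcol, if_pos hx]
  have hcond : ((x : Int) + 1 < (M : Int)) ↔ (x + 1 < M) := by exact_mod_cast Iff.rfl
  by_cases hx0 : 0 < x <;> by_cases hx1 : x + 1 < M
  · rw [if_pos hx0, if_pos hx0, if_pos hx1, if_pos (hcond.mpr hx1),
      if_pos (show x - 1 < M by omega), if_pos hx1]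
    ring
  · rw [if_pos hx0, if_pos hx0, if_neg hx1, if_neg (fun h => hx1 (hcond.mp h)),
      if_pos (show x - 1 < M by omega)]
    ring
  · rw [if_neg hx0, if_neg hx0, if_pos hx1, if_pos (hcond.mpr hx1), if_pos hx1]
    ring
  · rw [if_neg hx0, if_neg hx0, if_neg hx1, if_neg (fun h => hx1 (hcond.mp h))]
    ring

-- A's inner loop over x ∈ range' a b: writes fcell values into column y, leaves column y-1 alone
lemma inner_spec (M N y : Nat) (prev : Nat → Int) (hy : 1 ≤ y) (hyN : y < N) :
    ∀ (b a : Nat) (dp : Array (Array Int)), Shape dp M N → a + b ≤ M →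
      (∀ x, pvGet2 dp x (y - 1) = prev x) →
      Shape ((List.range' a b).foldl (innerBodyA M y) dp) M N ∧
      (∀ x, pvGet2 ((List.range' a b).foldl (innerBodyA M y) dp) x (y - 1) = prev x) ∧
      (∀ x, pvGet2 ((List.range' a b).foldl (innerBodyA M y) dp) x y =
        if a ≤ x ∧ x < a + b then fcell M prev x else pvGet2 dp x y) := by
  intro b
  induction b with
  | zero =>
      intro a dp hS _ hprev
      refine ⟨hS, hprev, fun x => ?_⟩
      simp only [List.range'_zero, List.foldl_nil]
      rw [if_neg (by omega)]
  | succ b ih =>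
      intro a dp hS hab hprev
      rw [List.range'_succ, List.foldl_cons]
      have haM : a < M := by omega
      have hlenM := hS.1
      have hrow : (dp.getD a #[]).size = N := hS.2 a haM
      have hbody : innerBodyA M y dp a = pvSet2 dp a y (fcell M prev a) := by
        simp only [innerBodyA, fcell, hprev]
        split_ifs <;> (congr 1; ring)
      have hset : ∀ x' y', pvGet2 (innerBodyA M y dp a) x' y' =
          if a = x' ∧ y = y' then fcell M prev a else pvGet2 dp x' y' := by
        intro x' y'
        rw [hbody, pvGet2_pvSet2]
        by_cases hc : a = x' ∧ y = y'
        · rw [if_pos ⟨hc.1, by omega, hc.2, by rw [← hc.2] at *; omega⟩, if_pos hc]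
        · rw [if_neg (fun h => hc ⟨h.1, h.2.2.1⟩), if_neg hc]
      have hS1 : Shape (innerBodyA M y dp a) M N := by
        rw [hbody]; exact shape_pvSet2 hS _ _ _
      have hprev1 : ∀ x, pvGet2 (innerBodyA M y dp a) x (y - 1) = prev x := by
        intro x; rw [hset, if_neg (by omega), hprev]
      obtain ⟨hS2, hprev2, hcol2⟩ := ih (a + 1) (innerBodyA M y dp a) hS1 (by omega) hprev1
      refine ⟨hS2, hprev2, fun x => ?_⟩
      rw [hcol2 x, hset x y]
      by_cases hx : a ≤ x ∧ x < a + (b + 1)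
      · rw [if_pos hx]
        by_cases hx1 : a + 1 ≤ x ∧ x < a + 1 + b
        · rw [if_pos hx1]
        · have hxa : x = a := by omega
          subst hxa
          rw [if_neg hx1, if_pos ⟨rfl, rfl⟩]
      · have hax : a ≠ x := fun he => hx ⟨le_of_eq he, by omega⟩
        rw [if_neg (by omega), if_neg (fun hc => hax hc.1), if_neg hx]

-- A's outer loop up to column k: the table's column k reads as the pure recursion's column k
lemma outer_spec (M N : Nat) (hM : 0 < M) (hN : 0 < N) (k : Nat) (hk : k ≤ N - 1) :
    Shape ((List.range' 1 k).foldl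
      (fun dp y => (List.range M).foldl (innerBodyA M y) dp)
      (pvSet2 (Array.replicate M (Array.replicate N 0)) 0 0 1)) M N ∧
    ∀ x, pvGet2 ((List.range' 1 k).foldl
      (fun dp y => (List.range M).foldl (innerBodyA M y) dp)
      (pvSet2 (Array.replicate M (Array.replicate N 0)) 0 0 1)) x k = Gcol M k x := by
  induction k with
  | zero =>
      have hS0 : Shape (Array.replicate M (Array.replicate N 0)) M N := by
        refine ⟨by simp, fun x hx => ?_⟩
        rw [agetD_rep, if_pos hx]
        simp
      have hlen0 : (Array.replicate M (Array.replicate N (0:Int))).size = M := by simp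
      have hrow0 : ((Array.replicate M (Array.replicate N (0:Int))).getD 0 #[]).size = N :=
        hS0.2 0 hM
      refine ⟨shape_pvSet2 hS0 0 0 1, fun x => ?_⟩
      simp only [List.range'_zero, List.foldl_nil]
      rw [pvGet2_pvSet2]
      by_cases hx0 : x = 0
      · subst hx0
        rw [if_pos ⟨rfl, by omega, rfl, by omega⟩]
        simp [Gcol, F, hM]
      · rw [if_neg (fun hc => hx0 hc.1.symm)]
        have hrowx : (Array.replicate M (Array.replicate N (0:Int))).getD x #[] =
            (if x < M then Array.replicate N 0 else #[]) := agetD_rep #[] M x _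
        have hz : pvGet2 (Array.replicate M (Array.replicate N 0)) x 0 = 0 := by
          rw [pvGet2, hrowx]
          split_ifs
          · rw [agetD_rep]; split_ifs
            all_goals rfl
          · simp [Array.getD]
        rw [hz, Gcol]
        split_ifs
        · rw [F, if_neg hx0]
        · rfl
  | succ k ih =>
      obtain ⟨hS, hcol⟩ := ih (by omega)
      rw [range'_concat1, List.foldl_append, List.foldl_cons, List.foldl_nil,
        show 1 + k = k + 1 by omega]
      obtain ⟨hS', hprev', hcol'⟩ :=
        inner_spec M N (k + 1) (Gcol M k) (by omega) (by omega)
          M 0 _ hS (by omega) (by intro x; rw [show k + 1 - 1 = k by omega]; exact hcol x)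
      rw [← List.range_eq_range'] at hS' hcol'
      refine ⟨hS', fun x => ?_⟩
      rw [hcol' x]
      by_cases hxM : x < M
      · rw [if_pos ⟨Nat.zero_le x, by omega⟩, fcell_F M k x hxM, Gcol, if_pos hxM]
      · rw [if_neg (by omega), pvGet2_ge hS (by omega), Gcol, if_neg hxM]

-- ===== VERDICT (by name: the statement is the Claim_ definition above) =====
theorem unique_paths_from_three_dir2_spec : Claim_equal_unique_paths_from_three_dir2 := by
  intro m n _ hpre
  unfold Spec_unique_paths_from_three_dir2 unique_paths_from_three_dir2 unique_paths_from_three_dir2_alt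
  by_cases h0 : m = 0 ∨ n = 0
  · rw [if_pos h0, if_pos h0]
  · rw [if_neg h0, if_neg h0]
    have hmn : 0 < m ∧ 0 < n := by
      rcases hpre with h | h | h
      · exact absurd (Or.inl h) h0
      · exact absurd (Or.inr h) h0
      · exact h
    have hM : 0 < m.toNat := by omega
    have hN : 0 < n.toNat := by omega
    obtain ⟨hS, hcol⟩ := outer_spec m.toNat n.toNat hM hN (n.toNat - 1) (le_refl _)
    rw [hcol 0]
    have hB := loopB_goal m n.toNat hN
    show Gcol m.toNat (n.toNat - 1) 0 =
      (loopB m (3 * n.toNat * n.toNat + 2) [(0, n.toNat - 1)]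
        PySem.Dict.empty).getD (0, n.toNat - 1) 0
    rw [PySem.Dict.getD_eq_get?_getD, hB, Option.getD_some, Gcol, if_pos hM,
      show ((m.toNat : Int)) = m by omega]
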